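-- pv_equiv track=rewrite | github.com/albtraum/study_algorithm | programmers/42626.py | solution
-- ===== SOURCE A (Python) =====
-- import heapq
--
-- def solution(scoville, K):
--     cnt = 0
--     heapq.heapify(scoville)
--     while(1):
--         if len(scoville) == 1:
--             return -1
--
--         heapq.heappush(scoville, heapq.heappop(scoville)+heapq.heappop(scoville)*2)
--
--         cnt +=1
--         if  K <= scoville[0]:
--             return cnt
-- ===== SOURCE B (Python) =====
-- def solution(scoville, K):
--     # Same return value as the heap version, by repeated linear scans over a plain
--     # list (simpler, no heapq).  Return-value equivalence only: A reorders the
--     # caller's list into heap order, B consumes/rebuilds it differently.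
--     cnt = 0
--     while True:
--         if len(scoville) == 1:
--             return -1
--         a = min(scoville)
--         scoville.remove(a)
--         b = min(scoville)
--         scoville.remove(b)
--         scoville.append(a + b * 2)
--         cnt += 1
--         if K <= min(scoville):
--             return cnt
-- ===== Notes on version B (the rewrite author's own statement) =====
-- stated objective: simpler
-- what changed: Replaces the heapq binary-heap machinery with repeated linear scans over a plain list: take min, remove it, take min again, remove, append a+b*2, and compare K against min(list); Pre_ only excludes the empty list, where A raises IndexError (B raises ValueError there too).
import Mathlib
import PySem

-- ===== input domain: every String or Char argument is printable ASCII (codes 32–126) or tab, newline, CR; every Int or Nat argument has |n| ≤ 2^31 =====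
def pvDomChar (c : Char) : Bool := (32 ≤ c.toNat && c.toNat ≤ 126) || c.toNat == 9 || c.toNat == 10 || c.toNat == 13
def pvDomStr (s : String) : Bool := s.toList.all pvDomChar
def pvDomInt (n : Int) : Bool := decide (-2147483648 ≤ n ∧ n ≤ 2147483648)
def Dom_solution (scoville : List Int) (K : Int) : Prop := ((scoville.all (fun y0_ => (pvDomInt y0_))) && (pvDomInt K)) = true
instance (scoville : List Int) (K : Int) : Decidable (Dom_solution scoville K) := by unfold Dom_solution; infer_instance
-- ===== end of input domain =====

-- B replaces the heapq binary heap with repeated linear min-scans over a plain list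
-- (simpler; same return value).  Return-value equivalence only: the Python A mutates
-- `scoville` into heap order while B consumes and rebuilds it differently.

-- ===== PORT A =====
-- PySem has no heapq, so CPython's Lib/heapq.py is ported by hand, step for step
-- (exact on all Int lists; list indexing/assignment becomes getD/set, indices are in
-- range at every use reachable from this file's entry points).

-- _siftdown(heap, startpos, pos) with newitem = heap[pos] held in a variable.
-- `fuel` only makes the recursion structural: the position moves to its parent, which is
-- strictly smaller, so with fuel = pos the fuel-out branch coincides with the loop exit.
def pvSiftdownLoop (fuel : Nat) (A : List Int) (startpos : Nat) (newitem : Int) (pos : Nat) : List Int :=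
  match fuel with
  | 0 => A.set pos newitem
  | fuel + 1 =>
    if startpos < pos then
      let parent := (pos - 1) / 2
      if newitem < A.getD parent 0 then
        pvSiftdownLoop fuel (A.set pos (A.getD parent 0)) startpos newitem parent
      else A.set pos newitem
    else A.set pos newitem

-- the descent loop of _siftup(heap, pos) followed by its trailing
-- 'heap[pos] = newitem; _siftdown(heap, startpos, pos)'
-- (`fuel` as above: the position moves to a child, strictly larger and below the length,
-- so with fuel = length the fuel-out branch is never reached.)
def pvSiftupLoop (fuel : Nat) (A : List Int) (startpos : Nat) (newitem : Int) (pos : Nat) : List Int :=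
  match fuel with
  | 0 => pvSiftdownLoop pos (A.set pos newitem) startpos newitem pos
  | fuel + 1 =>
    if 2 * pos + 1 < A.length then
      let l := 2 * pos + 1
      let childpos := if l + 1 < A.length ∧ ¬ A.getD l 0 < A.getD (l + 1) 0 then l + 1 else l
      pvSiftupLoop fuel (A.set pos (A.getD childpos 0)) startpos newitem childpos
    else pvSiftdownLoop pos (A.set pos newitem) startpos newitem pos

-- _siftup(heap, pos): startpos = pos, newitem = heap[pos]
def pvSiftup (A : List Int) (pos : Nat) : List Int :=
  pvSiftupLoop A.length A pos (A.getD pos 0) pos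

-- heappush(heap, item): heap.append(item); _siftdown(heap, 0, len(heap)-1)
def pvHeappush (A : List Int) (item : Int) : List Int :=
  pvSiftdownLoop A.length (A ++ [item]) 0 item A.length

-- heappop(heap): lastelt = heap.pop(); if heap: r = heap[0]; heap[0] = lastelt;
-- _siftup(heap, 0); return r; return lastelt.  ([] raises IndexError in Python;
-- unreachable under Pre_, junk value (0, []))
def pvHeappop (A : List Int) : Int × List Int :=
  match A with
  | [] => (0, [])
  | [a] => (a, [])
  | a :: b :: t =>
    let lastelt := (a :: b :: t).getLast (by simp)
    let rest := (a :: b :: t).dropLast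
    (rest.getD 0 0, pvSiftup (rest.set 0 lastelt) 0)

-- heapify(x): for i in reversed(range(len(x)//2)): _siftup(x, i)
def pvHeapify (A : List Int) : List Int :=
  ((List.range (A.length / 2)).reverse).foldl (fun B i => pvSiftup B i) A

-- the while(1) loop of solution.  `fuel` only makes the recursion structural: each
-- iteration shrinks the heap by one, so fuel = the initial length is never exhausted
-- on inputs satisfying Pre_ (the 0 of the fuel-out branch is junk, never returned there).
def pvLoopA (K : Int) : Nat → List Int → Int → Int
  | 0, _, _ => 0
  | fuel + 1, heap, cnt =>
    if heap.length = 1 then -1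
    else if heap.length = 0 then 0  -- heappop([]) raises IndexError; unreachable under Pre_
    else
      let p1 := pvHeappop heap
      let p2 := pvHeappop p1.2
      let h3 := pvHeappush p2.2 (p1.1 + p2.1 * 2)
      let cnt' := cnt + 1
      if K ≤ h3.getD 0 0 then cnt' else pvLoopA K fuel h3 cnt'

def solution (scoville : List Int) (K : Int) : Int :=
  pvLoopA K scoville.length (pvHeapify scoville) 0

-- ===== PORT B =====
-- the while True loop of B: min-scan, remove, min-scan, remove, append, compare.
-- `fuel` again only makes the recursion structural (each pass shortens the list by one).
def pvLoopB (K : Int) : Nat → List Int → Int → Int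
  | 0, _, _ => 0
  | fuel + 1, xs, cnt =>
    if xs.length = 1 then -1
    else
      match PySem.List.min? xs (fun x => x) with
      | none => 0  -- min([]) raises ValueError; unreachable under Pre_
      | some a =>
        match PySem.List.remove? xs a with
        | none => 0  -- unreachable: a ∈ xs
        | some xs1 =>
          match PySem.List.min? xs1 (fun x => x) with
          | none => 0  -- unreachable: xs1 ≠ [] since len(xs) ≥ 2 here
          | some b =>
            match PySem.List.remove? xs1 b with
            | none => 0  -- unreachable: b ∈ xs1
            | some xs2 =>
              let cnt' := cnt + 1
              match PySem.List.min? (xs2 ++ [a + b * 2]) (fun x => x) with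
              | none => 0  -- unreachable: the list is nonempty
              | some m => if K ≤ m then cnt' else pvLoopB K fuel (xs2 ++ [a + b * 2]) cnt'

def solution_alt (scoville : List Int) (K : Int) : Int :=
  pvLoopB K scoville.length scoville 0

-- ===== PRECONDITION & SPEC =====
-- Pre_ excludes only the empty list, on which the Python A raises IndexError
-- (heappop of an empty heap); B raises ValueError there (min of empty list).
def Pre_solution (scoville : List Int) (K : Int) : Prop := scoville ≠ []
instance (scoville : List Int) (K : Int) : Decidable (Pre_solution scoville K) := by unfold Pre_solution; infer_instance

def pvWitness_solution : List Int × Int := ([1, 2, 9, 3], 7)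

def Spec_solution (scoville : List Int) (K : Int) (out : Int) : Prop := out = solution_alt scoville K
instance (scoville : List Int) (K : Int) (out : Int) : Decidable (Spec_solution scoville K out) := by unfold Spec_solution; infer_instance

-- ===== CLAIM (what is proved, stated in full; the proofs are below) =====
def Claim_equal_solution : Prop := ∀ (scoville : List Int) (K : Int), Dom_solution scoville K → Pre_solution scoville K → Spec_solution scoville K (solution scoville K)

-- ===== LEMMAS AND PROOFS =====

-- length preservation through the heap operations
theorem pvSiftdownLoop_length (fuel : Nat) (A : List Int) (s : Nat) (ni : Int) (pos : Nat) :
    (pvSiftdownLoop fuel A s ni pos).length = A.length := by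
  fun_induction pvSiftdownLoop fuel A s ni pos <;> simp_all [List.length_set]

theorem pvSiftupLoop_length (fuel : Nat) (A : List Int) (s : Nat) (ni : Int) (pos : Nat) :
    (pvSiftupLoop fuel A s ni pos).length = A.length := by
  fun_induction pvSiftupLoop fuel A s ni pos <;>
    simp_all [pvSiftdownLoop_length, List.length_set]

theorem pvHeappop_length (A : List Int) :
    (pvHeappop A).2.length = A.length - 1 := by
  match A with
  | [] => rfl
  | [a] => rfl
  | a :: b :: t =>
    simp [pvHeappop, pvSiftup, pvSiftupLoop_length]

theorem pvHeappush_length (A : List Int) (x : Int) :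
    (pvHeappush A x).length = A.length + 1 := by
  simp [pvHeappush, pvSiftdownLoop_length]

-- j lies in the subtree rooted at s of the implicit binary tree (parent of j is (j-1)/2)
def pvUnder (s j : Nat) : Bool :=
  if j ≤ s then j == s else pvUnder s ((j - 1) / 2)
termination_by j
decreasing_by omega

theorem pvUnder_self (s : Nat) : pvUnder s s = true := by
  rw [pvUnder]; simp

theorem pvUnder_ge {s j : Nat} (h : pvUnder s j = true) : s ≤ j := by
  fun_induction pvUnder s j <;> simp_all <;> omega

theorem pvUnder_parent {s j : Nat} (h : pvUnder s j = true) (hne : j ≠ s) :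
    pvUnder s ((j - 1) / 2) = true := by
  have := pvUnder_ge h
  rw [pvUnder] at h
  simp only [if_neg (by omega : ¬ j ≤ s)] at h
  exact h

theorem pvUnder_zero (j : Nat) : pvUnder 0 j = true := by
  fun_induction pvUnder 0 j <;> simp_all

theorem pvUnder_child {s c : Nat} (hp : pvUnder s ((c - 1) / 2) = true) (hc : 1 ≤ c) :
    pvUnder s c = true := by
  have := pvUnder_ge hp
  rw [pvUnder]
  have : ¬ c ≤ s := by omega
  simp only [if_neg this]
  exact hp

-- edges (with child c, parent (c-1)/2) inside the subtree at s, excluding those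
-- touching position `pos`, are heap-ordered
def pvH1 (A : List Int) (s pos : Nat) : Prop :=
  ∀ c, 1 ≤ c → c < A.length → pvUnder s ((c - 1) / 2) = true →
    (c - 1) / 2 ≠ pos → c ≠ pos → A.getD ((c - 1) / 2) 0 ≤ A.getD c 0

-- the full heap invariant
def pvInv (A : List Int) : Prop :=
  ∀ c, 1 ≤ c → c < A.length → A.getD ((c - 1) / 2) 0 ≤ A.getD c 0

theorem pvGetD_set_self (l : List Int) (i : Nat) (a : Int) (h : i < l.length) :
    (l.set i a).getD i 0 = a := by
  simp [List.getD_eq_getElem?_getD, h]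

theorem pvGetD_set_ne (l : List Int) (i j : Nat) (a : Int) (h : i ≠ j) :
    (l.set i a).getD j 0 = l.getD j 0 := by
  simp [List.getD_eq_getElem?_getD, List.getElem?_set_ne h]

theorem pvGetD_mem (l : List Int) (i : Nat) (h : i < l.length) : l.getD i 0 ∈ l := by
  rw [List.getD_eq_getElem l 0 h]
  exact List.getElem_mem h

theorem pvCount_set (l : List Int) (i : Nat) (a x : Int) (h : i < l.length) :
    (l.set i a).count x + (if l.getD i 0 = x then 1 else 0)
      = l.count x + (if a = x then 1 else 0) := by
  induction l generalizing i with
  | nil => simp at h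
  | cons y t ih =>
    cases i with
    | zero =>
      simp only [List.set_cons_zero, List.count_cons, List.getD_cons_zero, beq_iff_eq]
      split_ifs <;> omega
    | succ i =>
      simp only [List.set_cons_succ, List.count_cons, List.getD_cons_succ, beq_iff_eq]
      have := ih i (by simpa using h)
      split_ifs at this ⊢ <;> omega

theorem pvPerm_set_set (A : List Int) (i j : Nat) (v : Int)
    (hij : i ≠ j) (hi : i < A.length) (hj : j < A.length) :
    ((A.set i (A.getD j 0)).set j v).Perm (A.set i v) := by
  rw [List.perm_iff_count]
  intro x
  have hj' : j < (A.set i (A.getD j 0)).length := by simpa using hj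
  have e1 := pvCount_set (A.set i (A.getD j 0)) j v x hj'
  have e2 := pvCount_set A i (A.getD j 0) x hi
  have e3 := pvCount_set A i v x hi
  rw [pvGetD_set_ne A i j _ hij] at e1
  split_ifs at e1 e2 e3 <;> omega

theorem pvRoot_min (A : List Int) (h : pvInv A) :
    ∀ j, j < A.length → A.getD 0 0 ≤ A.getD j 0 := by
  intro j
  induction j using Nat.strong_induction_on with
  | _ j ih =>
    intro hj
    cases Nat.eq_zero_or_pos j with
    | inl h0 => subst h0; exact le_refl _
    | inr hpos =>
      exact le_trans (ih ((j - 1) / 2) (by omega) (by omega)) (h j hpos hj)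

-- main specification of the bubble-up loop
theorem pvSdLoop_spec (fuel : Nat) (A : List Int) (s : Nat) (ni : Int) (pos : Nat)
    (hfuel : pos ≤ fuel)
    (hlt : pos < A.length) (hu : pvUnder s pos = true)
    (H1 : pvH1 A s pos)
    (H2 : ∀ c, 1 ≤ c → c < A.length → (c - 1) / 2 = pos → ni ≤ A.getD c 0)
    (H3 : s < pos → ∀ c, 1 ≤ c → c < A.length → (c - 1) / 2 = pos →
      A.getD ((pos - 1) / 2) 0 ≤ A.getD c 0) :
    (pvSiftdownLoop fuel A s ni pos).Perm (A.set pos ni) ∧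
    (∀ j, pvUnder s j = false → (pvSiftdownLoop fuel A s ni pos).getD j 0 = A.getD j 0) ∧
    (∀ c, 1 ≤ c → c < A.length → pvUnder s ((c - 1) / 2) = true →
      (pvSiftdownLoop fuel A s ni pos).getD ((c - 1) / 2) 0 ≤ (pvSiftdownLoop fuel A s ni pos).getD c 0) := by
  revert hfuel hlt hu H1 H2 H3
  fun_induction pvSiftdownLoop fuel A s ni pos with
  | case1 A pos =>
    intro hfuel hlt hu H1 H2 H3
    have hp0 : pos = 0 := by omega
    have hps : pos = s := by have := pvUnder_ge hu; omega
    refine ⟨List.Perm.refl _, ?_, ?_⟩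
    · intro j hj
      have hjpos : j ≠ pos := by intro he; rw [he, hu] at hj; cases hj
      exact pvGetD_set_ne A pos j ni (fun he => hjpos he.symm)
    · intro c hc1 hc2 hup
      by_cases hcpos : c = pos
      · exfalso; omega
      · by_cases hppos : (c - 1) / 2 = pos
        · rw [hppos, pvGetD_set_self A pos ni hlt,
            pvGetD_set_ne A pos c ni (fun he => hcpos he.symm)]
          exact H2 c hc1 hc2 hppos
        · rw [pvGetD_set_ne A pos _ ni (fun he => hppos he.symm),
            pvGetD_set_ne A pos c ni (fun he => hcpos he.symm)]
          exact H1 c hc1 hc2 hup hppos hcpos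
  | case2 A pos fuel hsp parent hni ih =>
    simp only [parent] at *
    intro hfuel hlt hu H1 H2 H3
    have hp0lt : (pos - 1) / 2 < pos := by omega
    have hu' : pvUnder s ((pos - 1) / 2) = true := pvUnder_parent hu (by omega)
    have hA'len : (A.set pos (A.getD ((pos - 1) / 2) 0)).length = A.length := by simp
    have hself : (A.set pos (A.getD ((pos - 1) / 2) 0)).getD pos 0 = A.getD ((pos - 1) / 2) 0 :=
      pvGetD_set_self A pos _ hlt
    have hne : ∀ j, j ≠ pos → (A.set pos (A.getD ((pos - 1) / 2) 0)).getD j 0 = A.getD j 0 :=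
      fun j hj => pvGetD_set_ne A pos j _ (fun he => hj he.symm)
    have H1' : pvH1 (A.set pos (A.getD ((pos - 1) / 2) 0)) s ((pos - 1) / 2) := by
      intro c hc1 hc2 hup hnp hnc
      rw [hA'len] at hc2
      by_cases hcpos : c = pos
      · exact absurd (by rw [hcpos] : (c - 1) / 2 = (pos - 1) / 2) hnp
      · by_cases hppos : (c - 1) / 2 = pos
        · rw [hppos, hself, hne c hcpos]
          exact H3 hsp c hc1 hc2 hppos
        · rw [hne _ hppos, hne c hcpos]
          exact H1 c hc1 hc2 hup hppos hcpos
    have H2' : ∀ c, 1 ≤ c → c < (A.set pos (A.getD ((pos - 1) / 2) 0)).length →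
        (c - 1) / 2 = (pos - 1) / 2 → ni ≤ (A.set pos (A.getD ((pos - 1) / 2) 0)).getD c 0 := by
      intro c hc1 hc2 hcp
      rw [hA'len] at hc2
      by_cases hcpos : c = pos
      · rw [hcpos, hself]; exact le_of_lt hni
      · rw [hne c hcpos]
        have h1c := H1 c hc1 hc2 (by rw [hcp]; exact hu') (by omega) hcpos
        rw [hcp] at h1c
        exact le_trans (le_of_lt hni) h1c
    have H3' : s < (pos - 1) / 2 → ∀ c, 1 ≤ c → c < (A.set pos (A.getD ((pos - 1) / 2) 0)).length →
        (c - 1) / 2 = (pos - 1) / 2 →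
        (A.set pos (A.getD ((pos - 1) / 2) 0)).getD (((pos - 1) / 2 - 1) / 2) 0
          ≤ (A.set pos (A.getD ((pos - 1) / 2) 0)).getD c 0 := by
      intro hsp0 c hc1 hc2 hcp
      rw [hA'len] at hc2
      have hqpos : ((pos - 1) / 2 - 1) / 2 ≠ pos := by omega
      have hq : A.getD (((pos - 1) / 2 - 1) / 2) 0 ≤ A.getD ((pos - 1) / 2) 0 :=
        H1 ((pos - 1) / 2) (by omega) (by omega)
          (pvUnder_parent hu' (by omega)) hqpos (by omega)
      rw [hne _ hqpos]
      by_cases hcpos : c = pos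
      · rw [hcpos, hself]; exact hq
      · rw [hne c hcpos]
        have h1c := H1 c hc1 hc2 (by rw [hcp]; exact hu') (by omega) hcpos
        rw [hcp] at h1c
        exact le_trans hq h1c
    obtain ⟨ihp, ihout, ihedge⟩ :=
      ih (by omega) (by rw [hA'len]; omega) hu' H1' H2' H3'
    refine ⟨?_, ?_, ?_⟩
    · exact ihp.trans (pvPerm_set_set A pos ((pos - 1) / 2) ni (by omega) hlt (by omega))
    · intro j hj
      have hjpos : j ≠ pos := by
        intro he; rw [he, hu] at hj; cases hj
      rw [ihout j hj, hne j hjpos]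
    · intro c hc1 hc2 hup
      exact ihedge c hc1 (by rwa [hA'len]) hup
  | case3 A pos fuel hsp parent hni =>
    simp only [parent] at *
    intro hfuel hlt hu H1 H2 H3
    refine ⟨List.Perm.refl _, ?_, ?_⟩
    · intro j hj
      have hjpos : j ≠ pos := by intro he; rw [he, hu] at hj; cases hj
      exact pvGetD_set_ne A pos j ni (fun he => hjpos he.symm)
    · intro c hc1 hc2 hup
      by_cases hcpos : c = pos
      · subst hcpos
        rw [pvGetD_set_ne A c ((c - 1) / 2) ni (by omega), pvGetD_set_self A c ni hlt]
        exact le_of_not_gt hni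
      · by_cases hppos : (c - 1) / 2 = pos
        · rw [hppos, pvGetD_set_self A pos ni hlt,
            pvGetD_set_ne A pos c ni (fun he => hcpos he.symm)]
          exact H2 c hc1 hc2 hppos
        · rw [pvGetD_set_ne A pos _ ni (fun he => hppos he.symm),
            pvGetD_set_ne A pos c ni (fun he => hcpos he.symm)]
          exact H1 c hc1 hc2 hup hppos hcpos
  | case4 A pos fuel hsp =>
    intro hfuel hlt hu H1 H2 H3
    have hps : pos = s := by have := pvUnder_ge hu; omega
    refine ⟨List.Perm.refl _, ?_, ?_⟩
    · intro j hj
      have hjpos : j ≠ pos := by intro he; rw [he, hu] at hj; cases hj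
      exact pvGetD_set_ne A pos j ni (fun he => hjpos he.symm)
    · intro c hc1 hc2 hup
      by_cases hcpos : c = pos
      · exfalso
        have := pvUnder_ge hup
        omega
      · by_cases hppos : (c - 1) / 2 = pos
        · rw [hppos, pvGetD_set_self A pos ni hlt,
            pvGetD_set_ne A pos c ni (fun he => hcpos he.symm)]
          exact H2 c hc1 hc2 hppos
        · rw [pvGetD_set_ne A pos _ ni (fun he => hppos he.symm),
            pvGetD_set_ne A pos c ni (fun he => hcpos he.symm)]
          exact H1 c hc1 hc2 hup hppos hcpos

-- main specification of the sift-down-then-up of _siftup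
theorem pvSuLoop_spec (fuel : Nat) (A : List Int) (s : Nat) (ni : Int) (pos : Nat)
    (hfuel : A.length ≤ fuel + pos)
    (hlt : pos < A.length) (hu : pvUnder s pos = true)
    (H1 : pvH1 A s pos)
    (H3 : s < pos → ∀ c, 1 ≤ c → c < A.length → (c - 1) / 2 = pos →
      A.getD ((pos - 1) / 2) 0 ≤ A.getD c 0) :
    (pvSiftupLoop fuel A s ni pos).Perm (A.set pos ni) ∧
    (∀ j, pvUnder s j = false → (pvSiftupLoop fuel A s ni pos).getD j 0 = A.getD j 0) ∧
    (∀ c, 1 ≤ c → c < A.length → pvUnder s ((c - 1) / 2) = true →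
      (pvSiftupLoop fuel A s ni pos).getD ((c - 1) / 2) 0 ≤ (pvSiftupLoop fuel A s ni pos).getD c 0) := by
  revert hfuel hlt hu H1 H3
  fun_induction pvSiftupLoop fuel A s ni pos with
  | case1 A pos =>
    intro hfuel hlt hu H1 H3
    exact absurd hlt (by omega)
  | case2 A pos fuel hchild l childpos ih =>
    intro hfuel hlt hu H1 H3
    have hl : l = 2 * pos + 1 := rfl
    have hcp : childpos = if l + 1 < A.length ∧ ¬ A.getD l 0 < A.getD (l + 1) 0
        then l + 1 else l := rfl
    have hpar : (childpos - 1) / 2 = pos := by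
      rw [hcp]; split <;> omega
    have hlt' : childpos < A.length := by
      rw [hcp]; split
      · next hc => exact hc.1
      · omega
    have hcp1 : 1 ≤ childpos := by
      rw [hcp]; split <;> omega
    have hmin : ∀ d, 1 ≤ d → d < A.length → (d - 1) / 2 = pos → A.getD childpos 0 ≤ A.getD d 0 := by
      intro d hd1 hd hdp
      have hdd : d = l ∨ d = l + 1 := by omega
      rw [hcp]; split
      · next hc =>
        rcases hdd with h | h <;> subst h
        · exact le_of_not_gt hc.2
        · exact le_refl _
      · next hc =>
        rcases hdd with h | h <;> subst h
        · exact le_refl _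
        · rcases not_and_or.mp hc with h' | h'
          · omega
          · exact le_of_lt (not_not.mp h')
    have hposcp : pos < childpos := by omega
    have hu' : pvUnder s childpos = true := pvUnder_child (by rw [hpar]; exact hu) (by omega)
    have hA'len : (A.set pos (A.getD childpos 0)).length = A.length := by simp
    have hself : (A.set pos (A.getD childpos 0)).getD pos 0 = A.getD childpos 0 :=
      pvGetD_set_self A pos _ hlt
    have hne : ∀ j, j ≠ pos → (A.set pos (A.getD childpos 0)).getD j 0 = A.getD j 0 :=
      fun j hj => pvGetD_set_ne A pos j _ (fun he => hj he.symm)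
    have H1' : pvH1 (A.set pos (A.getD childpos 0)) s childpos := by
      intro c hc1 hc2 hup hnp hnc
      rw [hA'len] at hc2
      by_cases hcpos : c = pos
      · subst hcpos
        have hcs : c ≠ s := by
          intro he
          have := pvUnder_ge hup
          omega
        have hsc : s < c := by
          have := pvUnder_ge hu; omega
        rw [hself, hne ((c - 1) / 2) (by omega)]
        exact H3 hsc childpos (by omega) hlt' hpar
      · by_cases hppos : (c - 1) / 2 = pos
        · rw [hppos, hself, hne c hcpos]
          exact hmin c hc1 hc2 hppos
        · rw [hne _ hppos, hne c hcpos]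
          exact H1 c hc1 hc2 hup hppos hcpos
    have H3' : s < childpos → ∀ c, 1 ≤ c → c < (A.set pos (A.getD childpos 0)).length →
        (c - 1) / 2 = childpos →
        (A.set pos (A.getD childpos 0)).getD ((childpos - 1) / 2) 0
          ≤ (A.set pos (A.getD childpos 0)).getD c 0 := by
      intro _ c hc1 hc2 hcp'
      rw [hA'len] at hc2
      rw [hpar, hself, hne c (by omega)]
      have h1c := H1 c hc1 hc2 (by rw [hcp']; exact hu') (by omega) (by omega)
      rwa [hcp'] at h1c
    obtain ⟨ihp, ihout, ihedge⟩ := ih (by rw [hA'len]; omega) (by rwa [hA'len]) hu' H1' H3'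
    refine ⟨?_, ?_, ?_⟩
    · exact ihp.trans (pvPerm_set_set A pos childpos ni (by omega) hlt hlt')
    · intro j hj
      have hjpos : j ≠ pos := by intro he; rw [he, hu] at hj; cases hj
      rw [ihout j hj, hne j hjpos]
    · intro c hc1 hc2 hup
      exact ihedge c hc1 (by rwa [hA'len]) hup
  | case3 A pos fuel hchild =>
    intro hfuel hlt hu H1 H3
    have hA'len : (A.set pos ni).length = A.length := by simp
    have hsd := pvSdLoop_spec pos (A.set pos ni) s ni pos (le_refl _) (by rwa [hA'len]) hu
      (by
        intro c hc1 hc2 hup hnp hnc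
        rw [hA'len] at hc2
        rw [pvGetD_set_ne A pos _ ni (fun he => hnp he.symm),
          pvGetD_set_ne A pos c ni (fun he => hnc he.symm)]
        exact H1 c hc1 hc2 hup hnp hnc)
      (by intro c hc1 hc2 hcp; rw [hA'len] at hc2; omega)
      (by intro _ c hc1 hc2 hcp; rw [hA'len] at hc2; omega)
    obtain ⟨hp, hout, hedge⟩ := hsd
    rw [List.set_set] at hp
    refine ⟨hp, ?_, ?_⟩
    · intro j hj
      have hjpos : j ≠ pos := by intro he; rw [he, hu] at hj; cases hj
      rw [hout j hj, pvGetD_set_ne A pos j ni (fun he => hjpos he.symm)]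
    · intro c hc1 hc2 hup
      exact hedge c hc1 (by rwa [hA'len]) hup

theorem pvSet_getD_self (l : List Int) (i : Nat) (h : i < l.length) :
    l.set i (l.getD i 0) = l := by
  apply List.ext_getElem (by simp)
  intro n h1 h2
  rw [List.getElem_set]
  split
  · next he => subst he; rw [List.getD_eq_getElem l 0 h]
  · rfl

theorem pvSiftup_spec (A : List Int) (i : Nat) (hi : i < A.length)
    (H1 : pvH1 A i i) :
    (pvSiftup A i).Perm A ∧
    (∀ j, pvUnder i j = false → (pvSiftup A i).getD j 0 = A.getD j 0) ∧
    (∀ c, 1 ≤ c → c < A.length → pvUnder i ((c - 1) / 2) = true →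
      (pvSiftup A i).getD ((c - 1) / 2) 0 ≤ (pvSiftup A i).getD c 0) := by
  have h := pvSuLoop_spec A.length A i (A.getD i 0) i (by omega) hi (pvUnder_self i) H1 (by omega)
  rw [pvSet_getD_self A i hi] at h
  refine ⟨h.1, h.2.1, ?_⟩
  intro c h1 h2 h3
  exact h.2.2 c h1 (by simpa [pvSiftup, pvSiftupLoop_length] using h2) h3

theorem pvFold_siftup_spec : ∀ (i : Nat) (A : List Int), i ≤ A.length →
    (∀ c, 1 ≤ c → c < A.length → i ≤ (c - 1) / 2 → A.getD ((c - 1) / 2) 0 ≤ A.getD c 0) →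
    ((List.range i).reverse.foldl (fun B j => pvSiftup B j) A).Perm A ∧
    pvInv ((List.range i).reverse.foldl (fun B j => pvSiftup B j) A) := by
  intro i
  induction i with
  | zero =>
    intro A _ hA
    exact ⟨List.Perm.refl _, fun c hc1 hc2 => hA c hc1 hc2 (by omega)⟩
  | succ i ih =>
    intro A hiA hA
    rw [List.range_succ, List.reverse_append, List.reverse_singleton, List.singleton_append,
      List.foldl_cons]
    have hi : i < A.length := by omega
    have H1 : pvH1 A i i := by
      intro c hc1 hc2 hup hnp _
      have := pvUnder_ge hup
      exact hA c hc1 hc2 (by omega)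
    obtain ⟨hperm, hout, hedge⟩ := pvSiftup_spec A i hi H1
    have hlen : (pvSiftup A i).length = A.length := hperm.length_eq
    have hnext : ∀ c, 1 ≤ c → c < (pvSiftup A i).length → i ≤ (c - 1) / 2 →
        (pvSiftup A i).getD ((c - 1) / 2) 0 ≤ (pvSiftup A i).getD c 0 := by
      intro c hc1 hc2 hip
      rw [hlen] at hc2
      by_cases hup : pvUnder i ((c - 1) / 2) = true
      · exact hedge c hc1 hc2 hup
      · have hi0 : 1 ≤ i := by
          rcases Nat.eq_zero_or_pos i with h | h
          · exfalso; rw [h, pvUnder_zero] at hup; exact hup rfl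
          · exact h
        have hci : pvUnder i c = false := by
          cases hci : pvUnder i c
          · rfl
          · exfalso
            by_cases hcc : c = i
            · omega
            · exact hup (pvUnder_parent hci hcc)
        rw [hout c hci, hout _ (eq_false_of_ne_true hup)]
        have hge := pvUnder_ge (s := i) (j := (c - 1) / 2)
        have hne : (c - 1) / 2 ≠ i := by
          intro he; exact hup (by rw [he]; exact pvUnder_self i)
        exact hA c hc1 hc2 (by omega)
    obtain ⟨ihp, ihinv⟩ := ih (pvSiftup A i) (by omega) hnext
    exact ⟨ihp.trans hperm, ihinv⟩

theorem pvHeapify_spec (A : List Int) : (pvHeapify A).Perm A ∧ pvInv (pvHeapify A) := by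
  unfold pvHeapify
  apply pvFold_siftup_spec (A.length / 2) A (by omega)
  intro c hc1 hc2 hip
  exfalso
  omega

theorem pvSet_append_last (A : List Int) (x v : Int) :
    (A ++ [x]).set A.length v = A ++ [v] := by
  induction A with
  | nil => rfl
  | cons a t ih => simp [ih]

theorem pvHeappush_spec (A : List Int) (x : Int) (h : pvInv A) :
    (pvHeappush A x).Perm (x :: A) ∧ pvInv (pvHeappush A x) := by
  unfold pvHeappush
  have hlen : (A ++ [x]).length = A.length + 1 := by simp
  obtain ⟨hp, hout, hedge⟩ := pvSdLoop_spec A.length (A ++ [x]) 0 x A.length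
    (le_refl _) (by omega) (pvUnder_zero _)
    (by
      intro c hc1 hc2 hup hnp hnc
      rw [hlen] at hc2
      have hc : c < A.length := by omega
      have hpc : (c - 1) / 2 < A.length := by omega
      rw [List.getD_append _ _ _ _ hpc, List.getD_append _ _ _ _ hc]
      exact h c hc1 hc)
    (by intro c hc1 hc2 hcp; rw [hlen] at hc2; omega)
    (by intro _ c hc1 hc2 hcp; rw [hlen] at hc2; omega)
  constructor
  · refine hp.trans ?_
    rw [pvSet_append_last]
    exact List.perm_append_singleton x A
  · intro c hc1 hc2
    rw [pvSiftdownLoop_length] at hc2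
    exact hedge c hc1 hc2 (pvUnder_zero _)

theorem pvRoot_min_mem (A : List Int) (h : pvInv A) : ∀ y ∈ A, A.getD 0 0 ≤ y := by
  intro y hy
  obtain ⟨j, hj, he⟩ := List.mem_iff_getElem.mp hy
  have := pvRoot_min A h j hj
  rwa [List.getD_eq_getElem A 0 hj, he] at this

theorem pvHeappop_spec (A : List Int) (hne : A ≠ []) (h : pvInv A) :
    (pvHeappop A).1 = A.getD 0 0 ∧
    ((pvHeappop A).1 :: (pvHeappop A).2).Perm A ∧ pvInv (pvHeappop A).2 := by
  match A with
  | [] => exact absurd rfl hne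
  | [a] =>
    refine ⟨rfl, List.Perm.refl _, ?_⟩
    intro c hc1 hc2
    simp [pvHeappop] at hc2
  | a :: b :: t =>
    have hsplit : (b :: t).dropLast ++ [(a :: b :: t).getLast (by simp)] = b :: t := by
      have h0 := List.dropLast_append_getLast (l := a :: b :: t) (by simp)
      simpa using h0
    have hstep : pvHeappop (a :: b :: t)
        = (a, pvSiftup ((a :: b :: t).getLast (by simp) :: (b :: t).dropLast) 0) := rfl
    have hA0len : ((a :: b :: t).getLast (by simp) :: (b :: t).dropLast).length
        = t.length + 1 := by simp
    have hsame : ∀ j, 1 ≤ j →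
        j < ((a :: b :: t).getLast (by simp) :: (b :: t).dropLast).length →
        ((a :: b :: t).getLast (by simp) :: (b :: t).dropLast).getD j 0
          = (a :: b :: t).getD j 0 := by
      intro j hj1 hj2
      rw [hA0len] at hj2
      obtain ⟨k, rfl⟩ : ∃ k, j = k + 1 := ⟨j - 1, by omega⟩
      rw [List.getD_cons_succ, List.getD_cons_succ]
      conv_rhs => rw [← hsplit]
      rw [List.getD_append _ _ _ _ (by simp; omega)]
    have H1 : pvH1 ((a :: b :: t).getLast (by simp) :: (b :: t).dropLast) 0 0 := by
      intro c hc1 hc2 hup hnp hnc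
      rw [hA0len] at hc2
      have hp1 : 1 ≤ (c - 1) / 2 := by omega
      rw [hsame _ hp1 (by rw [hA0len]; omega), hsame c hc1 (by rw [hA0len]; omega)]
      exact h c hc1 (by simp; omega)
    obtain ⟨hperm, hout, hedge⟩ :=
      pvSiftup_spec ((a :: b :: t).getLast (by simp) :: (b :: t).dropLast) 0 (by simp) H1
    rw [hstep]
    refine ⟨rfl, ?_, ?_⟩
    · have h2 : ((a :: b :: t).getLast (by simp) :: (b :: t).dropLast).Perm (b :: t) := by
        conv_rhs => rw [← hsplit]
        exact (List.perm_append_singleton _ _).symm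
      exact List.Perm.cons a (hperm.trans h2)
    · intro c hc1 hc2
      simp only [pvSiftup, pvSiftupLoop_length] at hc2
      exact hedge c hc1 hc2 (pvUnder_zero _)

theorem pvMin_unique {l l' : List Int} {x x' : Int}
    (hx : x ∈ l) (hmin : ∀ y ∈ l, x ≤ y)
    (hx' : x' ∈ l') (hmin' : ∀ y ∈ l', x' ≤ y)
    (hp : l.Perm l') : x = x' := by
  exact le_antisymm (hmin x' (hp.symm.subset hx')) (hmin' x (hp.subset hx))

theorem pvLoop_eq (K : Int) : ∀ n (heap xs : List Int) (cnt : Int),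
    pvInv heap → heap.Perm xs →
    pvLoopA K n heap cnt = pvLoopB K n xs cnt := by
  intro n
  induction n with
  | zero =>
    intro heap xs cnt hinv hperm
    rfl
  | succ n ih =>
    intro heap xs cnt hinv hperm
    have hlen := hperm.length_eq
    rw [pvLoopA]
    by_cases h1 : heap.length = 1
    · rw [if_pos h1, pvLoopB, if_pos (by omega)]
    · have hx1 : ¬ xs.length = 1 := by omega
      rw [if_neg h1]
      by_cases h0 : heap.length = 0
      · rw [if_pos h0]
        have hh : heap = [] := List.length_eq_zero_iff.mp h0
        have hx : xs = [] := by
          subst hh; exact hperm.symm.eq_nil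
        subst hx
        rw [pvLoopB]
        rfl
      · rw [if_neg h0]
        -- heap.length ≥ 2
        have hne : heap ≠ [] := by
          intro he; rw [he] at h0; exact h0 rfl
        have hxne : xs ≠ [] := by
          intro he; rw [he] at hlen
          exact hne (List.length_eq_zero_iff.mp (by simpa using hlen))
        obtain ⟨hv1, hp1, hinv1⟩ := pvHeappop_spec heap hne hinv
        -- B side: first min and removal
        obtain ⟨a, hmin⟩ : ∃ a, PySem.List.min? xs (fun x => x) = some a := by
          cases hm : PySem.List.min? xs (fun x => x) with
          | none => exact absurd ((PySem.List.min?_eq_none_iff xs _).mp hm) hxne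
          | some a => exact ⟨a, rfl⟩
        have hamem := PySem.List.min?_mem hmin
        have hamin := PySem.List.min?_isMin hmin
        have hrem := PySem.List.remove?_eq_some_erase xs a hamem
        -- first popped value equals a
        have hva : (pvHeappop heap).1 = a := by
          rw [hv1]
          exact pvMin_unique (pvGetD_mem heap 0 (by omega)) (pvRoot_min_mem heap hinv)
            hamem hamin hperm
        -- remainder permutation
        have hperm1 : (pvHeappop heap).2.Perm (xs.erase a) :=
          List.Perm.cons_inv (a := a)
            ((hva ▸ hp1).trans (hperm.trans (List.perm_cons_erase hamem)))
        have hlen1 : (pvHeappop heap).2.length = heap.length - 1 := pvHeappop_length heap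
        have hne1 : (pvHeappop heap).2 ≠ [] := by
          intro he; rw [he] at hlen1; simp at hlen1; omega
        obtain ⟨hv2, hp2, hinv2⟩ := pvHeappop_spec (pvHeappop heap).2 hne1 hinv1
        -- B side: second min and removal
        have hexne : xs.erase a ≠ [] := by
          intro he
          have := List.length_erase_of_mem hamem
          rw [he] at this; simp at this; omega
        obtain ⟨b, hmin2⟩ : ∃ b, PySem.List.min? (xs.erase a) (fun x => x) = some b := by
          cases hm : PySem.List.min? (xs.erase a) (fun x => x) with
          | none => exact absurd ((PySem.List.min?_eq_none_iff _ _).mp hm) hexne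
          | some b => exact ⟨b, rfl⟩
        have hbmem := PySem.List.min?_mem hmin2
        have hbmin := PySem.List.min?_isMin hmin2
        have hrem2 := PySem.List.remove?_eq_some_erase (xs.erase a) b hbmem
        have hvb : (pvHeappop (pvHeappop heap).2).1 = b := by
          rw [hv2]
          exact pvMin_unique (pvGetD_mem _ 0 (by omega)) (pvRoot_min_mem _ hinv1)
            hbmem hbmin hperm1
        have hperm2 : (pvHeappop (pvHeappop heap).2).2.Perm ((xs.erase a).erase b) :=
          List.Perm.cons_inv (a := b)
            ((hvb ▸ hp2).trans (hperm1.trans (List.perm_cons_erase hbmem)))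
        -- push / append
        obtain ⟨hpp, hpinv⟩ :=
          pvHeappush_spec (pvHeappop (pvHeappop heap).2).2
            ((pvHeappop heap).1 + (pvHeappop (pvHeappop heap).2).1 * 2) hinv2
        rw [hva, hvb] at hpp hpinv
        have hperm3 : (pvHeappush (pvHeappop (pvHeappop heap).2).2 (a + b * 2)).Perm
            ((xs.erase a).erase b ++ [a + b * 2]) :=
          hpp.trans ((List.Perm.cons (a + b * 2) hperm2).trans
            (List.perm_append_singleton _ _).symm)
        have hlen3 : (pvHeappush (pvHeappop (pvHeappop heap).2).2 (a + b * 2)).length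
            = heap.length - 1 := by
          rw [pvHeappush_length, pvHeappop_length, pvHeappop_length]
          omega
        obtain ⟨m, hminf⟩ : ∃ m,
            PySem.List.min? ((xs.erase a).erase b ++ [a + b * 2]) (fun x => x) = some m := by
          cases hm : PySem.List.min? ((xs.erase a).erase b ++ [a + b * 2]) (fun x => x) with
          | none =>
            have := (PySem.List.min?_eq_none_iff _ _).mp hm
            simp at this
          | some m => exact ⟨m, rfl⟩
        have hmroot :
            (pvHeappush (pvHeappop (pvHeappop heap).2).2 (a + b * 2)).getD 0 0 = m := by
          refine pvMin_unique (pvGetD_mem _ 0 ?_) (pvRoot_min_mem _ hpinv)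
            (PySem.List.min?_mem hminf) (PySem.List.min?_isMin hminf) hperm3
          omega
        -- reduce the B side to one step
        have hBeq : pvLoopB K (n + 1) xs cnt
            = if K ≤ m then cnt + 1
              else pvLoopB K n ((xs.erase a).erase b ++ [a + b * 2]) (cnt + 1) := by
          rw [pvLoopB, if_neg hx1]
          simp only [hmin]
          split
          · next heq => rw [hrem] at heq; cases heq
          · next xs1 heq =>
            rw [hrem] at heq
            obtain rfl : xs.erase a = xs1 := Option.some.inj heq
            simp only [hmin2]
            split
            · next heq3 => rw [hrem2] at heq3; cases heq3
            · next xs2 heq3 =>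
              rw [hrem2] at heq3
              obtain rfl : (xs.erase a).erase b = xs2 := Option.some.inj heq3
              simp only [hminf]
        rw [hBeq]
        simp only [hva, hvb]
        rw [hmroot]
        by_cases hK : K ≤ m
        · rw [if_pos hK, if_pos hK]
        · rw [if_neg hK, if_neg hK]
          exact ih _ _ (cnt + 1) hpinv hperm3

-- ===== VERDICT (by name: the statement is the Claim_ definition above) =====
theorem solution_spec : Claim_equal_solution := by
  intro scoville K _ _
  unfold Spec_solution solution solution_alt
  have h := pvHeapify_spec scoville
  exact pvLoop_eq K scoville.length (pvHeapify scoville) scoville 0 h.2 h.1
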